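-- pv_equiv track=rewrite | github.com/daucheng/61A | week6/exam_prep.py | no_eleven
-- ===== SOURCE A (Python) =====
-- def no_eleven(n):
--     """Return a list of lists of 1's and 6's that do not
--     contain 1 after 1.
--     >>> no_eleven(2)
--     [[6, 6], [6, 1], [1, 6]]
--     >>> no_eleven(3)
--     [[6, 6, 6], [6, 6, 1], [6, 1, 6], [1, 6, 6], [1, 6, 1]]
--     >>> no_eleven(4)[:4] # first half
--     [[6, 6, 6, 6], [6, 6, 6, 1], [6, 6, 1, 6], [6, 1, 6, 6]]
--     >>> no_eleven(4)[4:] # second half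
--     [[6, 1, 6, 1], [1, 6, 6, 6], [1, 6, 6, 1], [1, 6, 1, 6]]
--     """
--     if n == 0:
--         return [[]]
--     elif n == 1:
--         return [[6],[1]]
--     else:
--         a, b = no_eleven(n-1), no_eleven(n-2)
--     return [ [6]+s for s in a] + [[1,6]+s for s in b]
-- ===== SOURCE B (Python) =====
-- def no_eleven(n):
--     """Return a list of lists of 1's and 6's that do not
--     contain 1 after 1. Bottom-up DP: each level computed once."""
--     if n == 0:
--         return [[]]
--     if n == 1:
--         return [[6], [1]]
--     prev2, prev1 = [[]], [[6], [1]]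
--     for _ in range(2, n + 1):
--         cur = [[6] + s for s in prev1] + [[1, 6] + s for s in prev2]
--         prev2, prev1 = prev1, cur
--     return prev1
-- ===== Notes on version B (the rewrite author's own statement) =====
-- stated objective: alternative
-- what changed: Replaced the naive double recursion (which recomputes each subresult exponentially many times) with a bottom-up two-variable DP loop computing each level exactly once; intended as faster but a timing run could not confirm it (output size itself grows exponentially).
import Mathlib
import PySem

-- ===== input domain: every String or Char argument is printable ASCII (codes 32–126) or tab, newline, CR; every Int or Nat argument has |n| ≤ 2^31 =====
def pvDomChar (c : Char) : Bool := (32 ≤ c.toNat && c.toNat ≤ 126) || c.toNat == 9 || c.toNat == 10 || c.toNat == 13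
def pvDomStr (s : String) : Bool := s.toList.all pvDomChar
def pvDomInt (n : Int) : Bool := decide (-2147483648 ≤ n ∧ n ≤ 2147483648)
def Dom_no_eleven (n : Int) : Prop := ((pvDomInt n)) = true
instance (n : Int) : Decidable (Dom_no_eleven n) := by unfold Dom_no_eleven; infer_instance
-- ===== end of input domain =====

-- B replaces A's naive double recursion with a bottom-up two-variable DP loop computing each level once (intended as faster; a timing run could not confirm it at sizes both finish).


-- ===== PORT A =====
-- A's recursion, on the Nat value of n (Python A only terminates for nonnegative n; negative n is excluded by Pre_).
def noeA : Nat → List (List Int)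
  | 0 => [[]]
  | 1 => [[6], [1]]
  | (k+2) => (noeA (k+1)).map (fun s => 6 :: s) ++ (noeA k).map (fun s => 1 :: 6 :: s)

def no_eleven (n : Int) : List (List Int) := noeA n.toNat

-- ===== PORT B =====
-- one DP step: (prev2, prev1) ↦ (prev1, cur)
def noeStep (p : List (List Int) × List (List Int)) : List (List Int) × List (List Int) :=
  (p.2, p.2.map (fun s => 6 :: s) ++ p.1.map (fun s => 1 :: 6 :: s))

def no_eleven_alt (n : Int) : List (List Int) :=
  if n = 0 then [[]]
  else if n = 1 then [[6], [1]]
  else ((PySem.List.pyRange 2 (n+1) 1).foldl (fun p _ => noeStep p) ([[]], [[6], [1]])).2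

-- ===== PRECONDITION & SPEC =====
-- Pre_ excludes negative n, on which Python A recurses without bound (RecursionError).
def Pre_no_eleven (n : Int) : Prop := 0 ≤ n
instance (n : Int) : Decidable (Pre_no_eleven n) := by unfold Pre_no_eleven; infer_instance
def pvWitness_no_eleven : Int := (3)

def Spec_no_eleven (n : Int) (out : List (List Int)) : Prop := out = no_eleven_alt n
instance (n : Int) (out : List (List Int)) : Decidable (Spec_no_eleven n out) := by unfold Spec_no_eleven; infer_instance

-- ===== CLAIM (what is proved, stated in full; the proofs are below) =====
def Claim_equal_no_eleven : Prop := ∀ (n : Int), Dom_no_eleven n → Pre_no_eleven n → Spec_no_eleven n (no_eleven n)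

-- ===== LEMMAS AND PROOFS =====

-- the fold ignores its elements: it is iteration of noeStep, length many times
theorem foldl_noeStep (l : List Int) (s : List (List Int) × List (List Int)) :
    l.foldl (fun p _ => noeStep p) s = noeStep^[l.length] s := by
  induction l generalizing s with
  | nil => rfl
  | cons x xs ih => simp [List.foldl_cons, ih, Function.iterate_succ_apply]

theorem iterate_noeStep (m k : Nat) :
    noeStep^[m] (noeA k, noeA (k+1)) = (noeA (k+m), noeA (k+m+1)) := by
  induction m generalizing k with
  | zero => rfl
  | succ m ih =>
    rw [Function.iterate_succ_apply]
    have : noeStep (noeA k, noeA (k+1)) = (noeA (k+1), noeA (k+2)) := by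
      simp [noeStep, noeA]
    rw [this, ih (k+1)]
    ring_nf

-- ===== VERDICT (by name: the statement is the Claim_ definition above) =====
theorem no_eleven_spec : Claim_equal_no_eleven := by
  intro n _ hpre
  unfold Pre_no_eleven at hpre
  unfold Spec_no_eleven no_eleven no_eleven_alt
  split_ifs with h0 h1
  · subst h0; rfl
  · subst h1; rfl
  · rw [foldl_noeStep, PySem.List.length_pyRange_one]
    have h2 : 2 ≤ n := by omega
    have : ([([] : List Int)], [[(6:Int)], [1]]) = (noeA 0, noeA 1) := rfl
    rw [this, iterate_noeStep]
    have hm : (n + 1 - 2).toNat = n.toNat - 1 := by omega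
    have hk : 0 + (n.toNat - 1) + 1 = n.toNat := by omega
    rw [hm, hk]
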